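/-
  SEGMENT R7 OF `start_decoder` (0x115db9 – 0x115eee: the loops 4079 ⊃ 4084 of the residue section, c/stb_vorbis_fixed.c 4079 – 4087:
  `for (j = 0; j < entries; ++j) { classdata[j] = setup_malloc(f, classwords); … for (k = classwords − 1; k ≥ 0; --k)
  { classdata[j][k] = temp % classifications; temp /= classifications; } }`, then `++i`; 78 instructions, 2 contract calls
  (setup_malloc, error), 11 check sites, 2 `idiv`) SPLIT AT THE TWO LOOP HEADS AND AT THE RETURN OF setup_malloc: the assertions at
  the three cut points, the claims of the three children, and the composition `SegR7.of_parts` (pure logic: `ReachVia.trans` and two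
  nested inductions on the loops' measures; no machine step).

      R7a  0x115db9 – 0x115e37                                  the class book `cb = codebooks + 2120·classbook` (checked load8 of `codebooks`,
                                                                checked load1 of `classbook`), the checked load4 of `cb.entries`,
                                                                `cmp [cb + 4], r13d ; jg`: NOT taken (`entries ≤ j`): `r14d = [R + 38H] + 1`,
                                                                `jmp 115982`: AtR2 (i + 1) (the record is complete: `ResidueAtOK.assemble`);
                                                                taken: the checked load4 of `cb.dimensions` (r15d = W), `[R + 30H] := r + 10H`,
                                                                the checked load8 of `classdata`, r14 = 8j, r12 = classdata + 8j,
                                                                `setup_malloc(f, W)`, exit at its return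
                                                                exits: AtR2 (i + 1), AtR7Row j (cut266 = 0x115e3c)
      R7b  0x115e3c – 0x115e88                                  rax spilled to qword `[R + 18H]`, the checked store8 `classdata[j] = rax`,
                                                                the checked re-loads, `cmp qword [classdata + 8j], 0 ; jne`: NULL:
                                                                `error(f, 3)`, `jmp 113b22` (AtERR); else `r12d = W − 1`, `[R + 18H] := r13d`
                                                                (temp = j): the head of loop 4084
                                                                exits: AtERR, AtR7K j W (loop32 = cut268 = 0x115e8d)
      R7c  0x115e8d – 0x115eee                                  `test r12d, r12d ; js`: taken (k = −1): `++r13d`, `jmp 115db9`: AtR7J (j + 1);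
                                                                else `temp % classifications` (idiv) into `[R + 30H]`, the checked load8 of
                                                                `classdata[j]`, the checked byte store into `classdata[j][k]`,
                                                                `temp /= classifications` (idiv) into `[R + 18H]`, `--r12d`, `jmp 115e8d`
                                                                exits: AtR7J (j + 1), AtR7K j (n − 1)
  (29 + 19 + 30 = 78.)  The parent's entry `BodyR7` IS the head of loop 4079 with `j = 0` (same address: pc_R7 = cut265 = loop31):
  a pure implication inside `SegR7.of_parts`, no child.

  THE AGES OF THE BLOCKS — why the assertions have two more ghost arenas than the analysis (PROACTIVE-SPLITS.md, block R7) proposed.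
  The block states the rows as `RowsUpTo A.1.Blk` and the row being filled as `A.1.Blk ⟨row j, W⟩`. That is too weak twice:
  (1) the exit `AtR2 (i + 1)` needs record `i` as `ResidueAtOK (Since A6c A.1)` (`ResTrans.record` with `Ai := A.1`), so every row must be
  known as allocated SINCE `A6c`; (2) the store `classdata[j] = rax` (into the `classdata` block) and the byte stores into row `j` must keep
  the finished rows, and two blocks of the arena are known to be disjoint only when they are known to be DIFFERENT
  (`arena_disjoint … hne`), which comes from their ages (`Since.ne_old`, `Since.ne_since`): `BodyR7.cur.R8a` says `Since Ak A.1 ⟨classdata, 8E⟩`,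
  and rows that are merely `Since Ak A.1` cannot be told from it. So, exactly as `ResTrans` does it with `A6 / A6c / Ai`:
      `Ad`  the arena at the entry of R7 (right after `classdata` was allocated): `classdata` is `Since Ak Ad`, every row `Since Ad …`;
      `Ar`  (loop 4084 only) the arena before row `j` was allocated: the finished rows are `Since Ad Ar`, row `j` is `Since Ar A.1`.
  `BodyR7` (the parent's entry) is the head's assertion with `Ad := A.1`, `j = 0`.

  THE MEASURES are on ghost numbers: `E` (= `Residue.E`, the class book's `entries`; a parameter of the assertions with the clause
  `e_eq`, so that no measure reads the memory) for loop 4079: `E − j`; `n = k + 1 ∈ [0, W]` for loop 4084 (`k` is SIGNED and ends at −1: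
  r12d holds `n − 1` as a 32-bit value, `R7.kword n`).

  WHAT IS LIVE AT THE CUTS (read off c/vorbis_f.dis 115db9 … 115eee). Everywhere: rsp (= R), rbp (= f: `[rbp + 0a8H]`, `mov rdi, rbp`), rbx (= r =
  residue_config + 32 i: `[rbx + 0cH]`, `[rbx + 0dH]`, `[rbx + 10H]`), r13d (= j: `cmp [r12 + 4], r13d`, `movsxd rax, r13d`, `mov [R + 18H], r13d`,
  `add r13d, 1`), dword `[R + 38H]` (= i: read 0x115df4). Additionally
      loop31 (0x115db9)  nothing. DEAD: r12, r14, r15, `[R + 18H]`, `[R + 30H]` (each written before it is read).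
      cut266 (0x115e3c)  rax (setup_malloc's result), r12 (= classdata + 8j: 0x115e41 `mov rdi, r12`, 0x115e4e `mov [r12], rdx`), r14 (= 8j: 0x115e5c, and
                         in loop 4084 0x115eaa), r15d (= W: 0x115e84 `lea r12d, [r15 − 1]`), qword `[R + 30H]` (= r + 10H: 0x115e52 `mov rdi, [R + 30H]`).
      loop32 (0x115e8d)  r12d (= k = n − 1: 0x115e8d, 0x115eb9 `movsxd rax, r12d`, 0x115ee4), r14 (= 8j: 0x115eaa), dword `[R + 18H]` (= temp: 0x115e9f,
                         0x115ed9). DEAD: r15 (written 0x115eaa), `[R + 30H]` (written 0x115ea6 before it is read 0x115ecd).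
  All three labels exist in Vorbis/Labels.lean (loop31 = cut265, cut266 = ret425, loop32 = cut268): nothing for `AT`.

  THE CARRY LEMMAS the children use: Vorbis/Spec/StartDecoderRes.lean (`ResLoop.carry`, `ResTrans.carry_obj`, `Res.zero_carry`,
  `ResCur.carry_obj`), Vorbis/Spec/StartDecoderMid.lean (`SecPt.alloc_call` / `.alloc_fail`, `Mid.carry_spill` for the spill `[R + 18H]`);
  hints for the workers: farm/hints/start_decoder.R7.md.
-/
import Vorbis.Spec.StartDecoderRes
namespace Vorbis.Spec.StartDecoder
open X86 X86.User Asan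

/-! ### The assertions at the cut points -/

/-- **r12d as the counter of loop 4084**: the loop runs `k = W − 1, …, 0` and is left with `k = −1`; with `n = k + 1` (the number of
bytes of the row still to be stored) r12 holds `n − 1` as a zero-extended 32-bit value: `n − 1` for `n ≥ 1`, `FFFFFFFFH` for `n = 0`
(`lea r12d, [r15 − 1]` 0x115e84, `sub r12d, 1` 0x115ee4; tested by `test r12d, r12d ; js`, read signed by `movsxd rax, r12d`). -/
def R7.kword (n : Nat) : Word := if n = 0 then addr 0xFFFFFFFF else addr (n - 1)

/-- **loop31 (0x115db9), the head of loop 4079** (`for (j = 0; j < cb.entries; ++j)`): `BodyR7` with the counter `r13d = j ≤ E`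
instead of 0, the snapshot `Ad` (the arena at the entry of R7, right after `classdata` was allocated; `BodyR7` is `Ad := A.1`) and the
complete rows below `j`, each a block allocated since `Ad`. -/
structure BodyR7J (u₀ : State) (g : Ghost) (i j E : Nat) (A6 A6c Ai Ak Ad : Arena) (A : Arena × List Obj) (v : State) : Prop where
  /-- the invariant of loop 4043 at loop31 (`Frame`, `Hand`, `Mid g 6 6 7`, RES(i), `classdata = NULL` from record `i + 1` on) -/
  loop : ResLoop u₀ g L.start_decoder.loop31 i (i + 1) A6 A6c Ai A v
  /-- `Ak` = the arena right before `classdata` was allocated (after `residue_books`) -/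
  extk : Ai.Extends Ak
  /-- `Ad` = the arena right after `classdata` was allocated (the arena at the entry of R7) -/
  extd : Ak.Extends Ad
  /-- the rows were allocated after it -/
  extd' : Ad.Extends A.1
  /-- rbp = f -/
  rbp : v.reg .rbp = addr g.f
  /-- rbx = r = residue_config + 32·i -/
  rbx : v.reg .rbx = addr (resAt g v.mem i)
  /-- r13d = j (0 at the entry, `add r13d, 1` 0x115eea; read 0x115ded, 0x115e1f) -/
  r13 : v.reg .r13 = addr j
  /-- dword `[R + 38H]` = i (read 0x115df4) -/
  cnt : slot g v.mem 0x38 = i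
  /-- record `i` up to R8a's first half: `residue_books` allocated between `Ai` and `Ak`, `classdata` between `Ak` and `Ad` -/
  cur : ResCur g (Since Ai Ak) (Since Ak Ad) v.mem i 7
  /-- the ghost `E` is the class book's `entries` (the measure of loop 4079 is `E − j`) -/
  e_eq : Residue.E v.mem g.f (resAt g v.mem i) = E
  /-- the counter has not passed the bound (with the `jg` not taken: `j = E`) -/
  j_le : j ≤ E
  /-- the rows below `j`: blocks of `W` bytes allocated since `Ad`, every byte a class number -/
  rows : RowsUpTo (Since Ad A.1) v.mem g.f (resAt g v.mem i) j

/-- `AtR7J u₀ g i j E v`: the exit assertion of `start_decoder.R7c` (j + 1), the entry assertion of `start_decoder.R7a`; the parent's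
entry `AtR7` is `AtR7J … 0 E` (`SegR7.of_parts`). -/
def AtR7J (u₀ : State) (g : Ghost) (i j E : Nat) (v : State) : Prop :=
  ∃ A6 A6c Ai Ak Ad A, BodyR7J u₀ g i j E A6 A6c Ai Ak Ad A v

/-- **cut266 (0x115e3c), the return of `setup_malloc(f, W)`** (`W = classwords = cb.dimensions`): `A` = the ghost BEFORE the call,
`A'` = the ghost after it (`alloc`: the same and rax = 0, or grown by the block in rax, allocated since `A.1`); the loop's invariant
holds for `A'`; the rows below `j` are stated for the arena before the call; the address registers of the body. -/
structure BodyR7Row (u₀ : State) (g : Ghost) (i j E : Nat) (A6 A6c Ai Ak Ad : Arena) (A A' : Arena × List Obj) (v : State) :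
    Prop where
  /-- the invariant of loop 4043 at cut266, for the ghost after the call -/
  loop : ResLoop u₀ g L.start_decoder.cut266 i (i + 1) A6 A6c Ai A' v
  /-- rax and the new ghost: NULL and unchanged, or the new row `⟨B + S + 32, W⟩`, `Since A.1 A'.1` -/
  alloc : AllocRet A A' (Residue.W v.mem g.f (resAt g v.mem i)) v
  /-- `Ak` = the arena right before `classdata` was allocated -/
  extk : Ai.Extends Ak
  /-- `Ad` = the arena right after `classdata` was allocated -/
  extd : Ak.Extends Ad
  /-- the finished rows were allocated after it, before the call -/
  extd' : Ad.Extends A.1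
  /-- rbp = f (read 0x115e77 `mov rdi, rbp`) -/
  rbp : v.reg .rbp = addr g.f
  /-- rbx = r (read 0x115e5f `add r12, [rbx + 10H]`) -/
  rbx : v.reg .rbx = addr (resAt g v.mem i)
  /-- r13d = j (read 0x115e88 `mov [R + 18H], r13d`) -/
  r13 : v.reg .r13 = addr j
  /-- dword `[R + 38H]` = i -/
  cnt : slot g v.mem 0x38 = i
  /-- record `i` up to R8a's first half -/
  cur : ResCur g (Since Ai Ak) (Since Ak Ad) v.mem i 7
  /-- the ghost `E` is the class book's `entries` -/
  e_eq : Residue.E v.mem g.f (resAt g v.mem i) = E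
  /-- row `j` exists (`classdata[j]` is inside the block of `8·E` bytes) -/
  j_lt : j < E
  /-- the rows below `j`, allocated since `Ad`, blocks of the arena before the call -/
  rows : RowsUpTo (Since Ad A.1) v.mem g.f (resAt g v.mem i) j
  /-- r14 = 8j (0x115e22 `lea r14, [rax*8]`; read 0x115e5c `mov r12, r14` and by loop 4084 0x115eaa) -/
  r14 : v.reg .r14 = addr (8 * j)
  /-- r12 = `&classdata[j]` (0x115e2a – 0x115e2d; read 0x115e41 `mov rdi, r12`, 0x115e4e `mov [r12], rdx`) -/
  r12 : v.reg .r12 = addr (Residue.classdata v.mem (resAt g v.mem i) + 8 * j)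
  /-- r15d = W (0x115e0a `mov r15d, [cb]`; read 0x115e84 `lea r12d, [r15 − 1]`) -/
  r15 : v.reg .r15 = addr (Residue.W v.mem g.f (resAt g v.mem i))
  /-- qword `[R + 30H]` = `&r->classdata` = r + 10H (0x115e12; read 0x115e52 `mov rdi, [R + 30H]`) -/
  slot30 : v.mem.u64 (g.R + 0x30) = resAt g v.mem i + 0x10

/-- `AtR7Row u₀ g i j E v`: an exit assertion of `start_decoder.R7a`, the entry assertion of `start_decoder.R7b`. -/
def AtR7Row (u₀ : State) (g : Ghost) (i j E : Nat) (v : State) : Prop :=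
  ∃ A6 A6c Ai Ak Ad A A', BodyR7Row u₀ g i j E A6 A6c Ai Ak Ad A A' v

/-- **loop32 (0x115e8d), the head of loop 4084** (`for (k = classwords − 1; k ≥ 0; --k)`), `n = k + 1` bytes of row `j` still to be
stored: the head's assertion of loop 4079 with `j < E`, the snapshot `Ar` (the arena before row `j` was allocated: the finished rows are
`Since Ad Ar`, row `j` is `Since Ar A.1` — so the byte stores into row `j` keep them), `r12d = n − 1`, `r14 = 8j`, `temp` in dword
`[R + 18H]`, and the bytes of row `j` from `n` on. -/
structure BodyR7K (u₀ : State) (g : Ghost) (i j E n : Nat) (A6 A6c Ai Ak Ad Ar : Arena) (A : Arena × List Obj) (v : State) :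
    Prop where
  /-- the invariant of loop 4043 at loop32 -/
  loop : ResLoop u₀ g L.start_decoder.loop32 i (i + 1) A6 A6c Ai A v
  /-- `Ak` = the arena right before `classdata` was allocated -/
  extk : Ai.Extends Ak
  /-- `Ad` = the arena right after `classdata` was allocated -/
  extd : Ak.Extends Ad
  /-- `Ar` = the arena right before row `j` was allocated -/
  extr : Ad.Extends Ar
  /-- row `j` was allocated after it -/
  extr' : Ar.Extends A.1
  /-- rbp = f -/
  rbp : v.reg .rbp = addr g.f
  /-- rbx = r (read 0x115e92 `lea rdi, [rbx + 0cH]`, 0x115ead `add r15, [rbx + 10H]`) -/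
  rbx : v.reg .rbx = addr (resAt g v.mem i)
  /-- r13d = j (read 0x115eea `add r13d, 1`) -/
  r13 : v.reg .r13 = addr j
  /-- dword `[R + 38H]` = i -/
  cnt : slot g v.mem 0x38 = i
  /-- record `i` up to R8a's first half -/
  cur : ResCur g (Since Ai Ak) (Since Ak Ad) v.mem i 7
  /-- the ghost `E` is the class book's `entries` -/
  e_eq : Residue.E v.mem g.f (resAt g v.mem i) = E
  /-- row `j` exists -/
  j_lt : j < E
  /-- the rows below `j`: allocated between `Ad` and `Ar` -/
  rows : RowsUpTo (Since Ad Ar) v.mem g.f (resAt g v.mem i) j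
  /-- row `j` (`classdata[j]`, stored 0x115e4e, non-NULL): a block of `W` bytes allocated since `Ar` -/
  row : Since Ar A.1 ⟨Residue.row v.mem (resAt g v.mem i) j, Residue.W v.mem g.f (resAt g v.mem i)⟩
  /-- r14 = 8j (read 0x115eaa `mov r15, r14`) -/
  r14 : v.reg .r14 = addr (8 * j)
  /-- r12d = k = n − 1, as a 32-bit value (−1 = FFFFFFFFH when the loop is left) -/
  r12 : v.reg .r12 = R7.kword n
  /-- at most `W` bytes are left (`n = W` at the entry of the loop) -/
  n_le : n ≤ Residue.W v.mem g.f (resAt g v.mem i)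
  /-- `0 ≤ temp ≤ j` (dword `[R + 18H]`: `j` at the entry 0x115e88, `temp / classifications` 0x115ee0; the dividend of both `idiv`:
  non-negative and below 2^31, so `cdq` gives edx = 0 and no `#DE`) -/
  temp : slot g v.mem 0x18 ≤ j
  /-- the bytes `k' ≥ n` of row `j` are class numbers -/
  bytes : RowBytesFrom v.mem g.f (resAt g v.mem i) j n

/-- `AtR7K u₀ g i j E n v`: an exit assertion of `start_decoder.R7b` (n = W) and of `start_decoder.R7c` (n − 1), the entry assertion
of `start_decoder.R7c`. -/
def AtR7K (u₀ : State) (g : Ghost) (i j E n : Nat) (v : State) : Prop :=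
  ∃ A6 A6c Ai Ak Ad Ar A, BodyR7K u₀ g i j E n A6 A6c Ai Ak Ad Ar A v

/-! ### The claims of the children -/

/-- **Segment `start_decoder.R7a`** (0x115db9 – 0x115e37): the loop test of 4079 (`cb.entries > j`, three check sites); not taken: the
record is complete, `r14d = i + 1`, the head of loop 4043 (`AtR2 (i + 1)`, the parent's exit); taken: `W = cb.dimensions`,
`&classdata[j]`, `setup_malloc(f, W)`; exit at its return. -/
def SegR7a (Lay : Layout) (μ : Microarch) (u₀ : State) : Prop :=
  ∀ (g : Ghost) (i j E : Nat) (v : State), AtR7J u₀ g i j E v →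
    ReachVia Lay μ WayInv v (fun w => AtR2 u₀ g (i + 1) w ∨ AtR7Row u₀ g i j E w)

/-- **Segment `start_decoder.R7b`** (0x115e3c – 0x115e88): `classdata[j] = rax` (checked store8), re-loaded and tested; NULL:
`error(f, VORBIS_outofmem)`, `jmp` to the epilogue (`AtERR`); else `k = W − 1`, `temp = j`: the head of loop 4084 with all `W` bytes to
store. -/
def SegR7b (Lay : Layout) (μ : Microarch) (u₀ : State) : Prop :=
  ∀ (g : Ghost) (i j E : Nat) (v : State), AtR7Row u₀ g i j E v →
    ReachVia Lay μ WayInv v (fun w => (∃ n, AtR7K u₀ g i j E n w) ∨ AtERR u₀ g w)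

/-- **Segment `start_decoder.R7c`** (0x115e8d – 0x115eee): the loop test of 4084; `k < 0` (`n = 0`): the row is complete, `++j`, the
head of loop 4079 (`RowsUpTo.succ`); else one byte `classdata[j][k] = temp % classifications` (checked store1), `temp /=
classifications`, `--k`: the head of loop 4084 with `n − 1`. -/
def SegR7c (Lay : Layout) (μ : Microarch) (u₀ : State) : Prop :=
  ∀ (g : Ghost) (i j E n : Nat) (v : State), AtR7K u₀ g i j E n v →
    ReachVia Lay μ WayInv v (fun w => AtR7J u₀ g i (j + 1) E w ∨ (0 < n ∧ AtR7K u₀ g i j E (n - 1) w))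

/-! ### The pure logic of the exits (for the children's proofs; they also show that the assertions are strong enough) -/

namespace R7

/-- A block allocated between `Ai` and `Ak` (`residue_books`) was allocated since `A6c` and is a block of the current arena. -/
theorem since_books {A6c Ai Ak Ad A : Arena} {B : Block} (h6c : A6c.Extends Ai) (hd : Ak.Extends Ad)
    (hd' : Ad.Extends A) (h : Since Ai Ak B) : Since A6c A B :=
  (h.older h6c).mono (hd.trans hd')

/-- A block allocated between `Ak` and `Ad` (`classdata`) was allocated since `A6c` and is a block of the current arena. -/
theorem since_classdata {A6c Ai Ak Ad A : Arena} {B : Block} (h6c : A6c.Extends Ai) (hk : Ai.Extends Ak) (hd' : Ad.Extends A)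
    (h : Since Ak Ad B) : Since A6c A B :=
  (h.older (h6c.trans hk)).mono hd'

/-- A block allocated since `Ad` (a row) was allocated since `A6c`. -/
theorem since_row {A6c Ai Ak Ad A : Arena} {B : Block} (h6c : A6c.Extends Ai) (hk : Ai.Extends Ak) (hd : Ak.Extends Ad)
    (h : Since Ad A B) : Since A6c A B :=
  h.older ((h6c.trans hk).trans hd)

/-- **THE EXIT OF LOOP 4079 (`j = E`): RES(i + 1)** — the transient of loop 4043 for the next iteration, with the current arena as
the new head-of-iteration snapshot: record `i` is assembled (`ResidueAtOK.assemble`) from the fields (`cur`), the blocks with their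
ages (`residue_books`, `classdata`, every row: all allocated since `A6c`) and the contents (`cur.R8c`, `rows`). `hW`: K1 of the class
book (`Codebook.K1` through `Mid.own.books`). Memory-only: R7a's exit `AtR2 (i + 1)` is this + `ResLoop.carry` over the check sites'
pushes + `r14d = i + 1`. -/
theorem exit_trans {u₀ : State} {g : Ghost} {i j E : Nat} {A6 A6c Ai Ak Ad : Arena} {A : Arena × List Obj} {v : State}
    (hb : BodyR7J u₀ g i j E A6 A6c Ai Ak Ad A v) (hj : E ≤ j) (hW : 1 ≤ Residue.W v.mem g.f (resAt g v.mem i)) :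
    ResTrans A6 A6c A.1 A.1 v.mem g.f (i + 1) := by
  have hres := hb.loop.res
  have hcur := hb.cur
  have hje : j = Residue.E v.mem g.f (resAt g v.mem i) := by
    have h1 := hb.j_le
    have h2 := hb.e_eq
    omega
  have hlt := hcur.lt
  refine ⟨hres.ext6, hres.ext6c.trans hres.exti, Arena.Extends.refl _, ?_, hres.R1, hres.R2, ?_, ?_⟩
  · push_cast
    omega
  · intro i' hi'
    by_cases e : i' = i
    · rw [e]
      exact hcur.R3
    · exact hres.R3 i' (by omega)
  · intro i' hi'
    by_cases e : i' = i
    · rw [e]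
      have hrows : RowsUpTo (Since A6c A.1) v.mem g.f (resAt g v.mem i) (Residue.E v.mem g.f (resAt g v.mem i)) := by
        rw [← hje]
        exact ⟨fun q hq => since_row hres.ext6c hb.extk hb.extd (hb.rows.rows q hq), hb.rows.bytes⟩
      exact ResidueAtOK.assemble hcur.R4 hcur.R5 hcur.R6 hcur.R7 hW
        (since_books hres.ext6c hb.extd hb.extd' (hcur.R8 (by omega)))
        (hcur.R8c (by omega))
        (since_classdata hres.ext6c hb.extk hb.extd' (hcur.R8a (by omega)))
        hrows
    · exact ResidueAtOK.mono (hres.record i' (by omega)) (fun _ hB => hB.mono hres.exti)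

/-- **THE EXIT OF LOOP 4084 (`n = 0`): one more complete row** — the rows' invariant of loop 4079 for `j + 1` over the current
arena: the finished rows are still allocated (`Since.mono`), row `j` was allocated since `Ad` too (`Since.older`), all its bytes
are class numbers. Memory-only: R7c's exit `AtR7J (j + 1)` is this + the unchanged fields + `r13d = j + 1`. -/
theorem next_rows {u₀ : State} {g : Ghost} {i j E n : Nat} {A6 A6c Ai Ak Ad Ar : Arena} {A : Arena × List Obj} {v : State}
    (hb : BodyR7K u₀ g i j E n A6 A6c Ai Ak Ad Ar A v) (hn : n = 0) :
    RowsUpTo (Since Ad A.1) v.mem g.f (resAt g v.mem i) (j + 1) := by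
  have hold : RowsUpTo (Since Ad A.1) v.mem g.f (resAt g v.mem i) j :=
    ⟨fun q hq => (hb.rows.rows q hq).mono hb.extr', hb.rows.bytes⟩
  apply hold.succ (hb.row.older hb.extr)
  rw [← hn]
  exact hb.bytes

end R7

/-! ### One round of loop 4084 as a step lemma (R7c's main arm; it exercises `BodyR7K` as an entry AND as an exit) -/

namespace R7

/-- **ONE ROUND OF LOOP 4084**: from the head with `n ≥ 1` bytes left to the head with `n − 1`, over ONE footprint whose windows are
the stack below the frame (the check sites' pushes), the dword `[R + 30H]` (`temp % classifications`), the dword `[R + 18H]`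
(`temp / classifications`) and the ONE byte `classdata[j][n − 1]` (`hok`). The byte stored is a class number (`hbyte`:
`Res.class_digit_lt`), `temp` did not grow (`htemp`: `Res.class_div_le`). Everything else of the assertion is carried here: the loop's
invariant (`ResLoop.carry_spill`: row `j` is `Young Ai A`), the record (`ResCur.carry_obj`), the finished rows (`RowsUpTo.frame`: they
are blocks of `Ar`, row `j` is not: `Since.ne_old`), the row's bytes (`RowBytesFrom.step`). -/
theorem byte_step {u₀ : State} {g : Ghost} {i j E n : Nat} {A6 A6c Ai Ak Ad Ar : Arena} {A : Arena × List Obj} {v w : State}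
    {ws : List Span} (hb : BodyR7K u₀ g i j E n A6 A6c Ai Ak Ad Ar A v) (hn : 0 < n)
    (hs : Mem.SameExcept ws v.mem w.mem) (hun : ShadowUntouched v.mem w.mem)
    (hok : ∀ x, x ∈ ws → (g.R - 408 ≤ x.lo ∧ x.hi ≤ g.R + 8) ∨ (g.R + 0x30 ≤ x.lo ∧ x.hi ≤ g.R + 0x34) ∨
      (g.R + 0x18 ≤ x.lo ∧ x.hi ≤ g.R + 0x1c) ∨
      (x.lo = Residue.row v.mem (resAt g v.mem i) j + (n - 1) ∧ x.hi = Residue.row v.mem (resAt g v.mem i) j + n))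
    (hbyte : w.mem.u8 (Residue.row v.mem (resAt g v.mem i) j + (n - 1)) < Residue.classifications v.mem (resAt g v.mem i))
    (htemp : slot g w.mem 0x18 ≤ slot g v.mem 0x18) (hbits : Bits (g.Blk A) g.len w.mem g.f)
    (hrip : w.rip = L.start_decoder.loop32) (hrsp : w.reg .rsp = addr g.R) (hcode : CodeOK u₀ w.mem) (hinv : abiInv w)
    (hrbp : w.reg .rbp = v.reg .rbp) (hrbx : w.reg .rbx = v.reg .rbx) (hr13 : w.reg .r13 = v.reg .r13)
    (hr14 : w.reg .r14 = v.reg .r14) (hr12 : w.reg .r12 = R7.kword (n - 1)) :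
    BodyR7K u₀ g i j E (n - 1) A6 A6c Ai Ak Ad Ar A w := by
  have hloop := hb.loop
  have hres := hloop.res
  have hcur := hb.cur
  have hlt := hcur.lt
  have h1 := hres.R1
  have h64 : i < 64 := by omega
  have harena := hloop.mid.arena
  have hp : Pos g A := Pos.of_mid hloop.frame hloop.hand hloop.mid
  have p1 := hp.r_eq
  have p2 := hp.ra_lo
  have p3 := hp.ra_hi
  have p4 := hp.objOut
  have p5 := hp.ar_stack
  have p6 := hp.ar_hi
  have p7 := hp.f_stack
  have p8 := hp.f_hi
  have hnW := hb.n_le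
  -- the chain of snapshots
  have hAiAr : Ai.Extends Ar := (hb.extk.trans hb.extd).trans hb.extr
  have hAkAr : Ak.Extends Ar := hb.extd.trans hb.extr
  -- row `j`: allocated since `Ar` (so since `Ai`), inside the arena's buffer
  have hrow := hb.row
  have hrowAi := hrow.older hAiAr
  have hrowIn := arena_inside harena hrow.1
  simp only [] at hrowIn
  -- every window is a window of the residue loop's carry
  have hwin : ∀ x, x ∈ ws → ResWin g i (resAt g v.mem i) Ai A x ∨ (g.R + 0x18 ≤ x.lo ∧ x.hi ≤ g.R + 0x20) := by
    intro x hx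
    rcases hok x hx with q | q | q | q
    · exact Or.inl (Or.inl q)
    · exact Or.inl (Or.inr (Or.inl (by omega)))
    · exact Or.inr (by omega)
    · refine Or.inl (Or.inr (Or.inr (Or.inr (Or.inr (Or.inr (Or.inr (Or.inr (Or.inr (Or.inr (Or.inr (Or.inr ?_)))))))))))
      apply Young.of_since harena hres.exti hrowAi
      simp only []
      omega
  have hloop' := hloop.carry_spill hlt hs hun hwin hbits hrip hrsp hcode hinv
  -- a block of the arena other than row `j` is kept
  have keptB : ∀ B : Block, A.1.Blk B →
      B ≠ ⟨Residue.row v.mem (resAt g v.mem i) j, Residue.W v.mem g.f (resAt g v.mem i)⟩ → B.Kept v.mem w.mem := by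
    intro B hB hne
    have hin := arena_inside harena hB
    have hd := arena_disjoint harena hB hrow.1 hne
    simp only [vblock] at hd
    apply Block.Kept.of_sameExcept hs
    · intro x hx
      rcases hok x hx with q | q | q | q
      · omega
      · omega
      · omega
      · omega
    · omega
  -- a block of the snapshot `Ar` is such a block
  have keptOld : ∀ B : Block, Ar.Blk B → B.Kept v.mem w.mem := by
    intro B hB
    exact keptB B (hB.mono hb.extr') (Since.ne_old hB hrow)
  -- the windows of `*f` that the record reads
  have he : ObjEq (Res.wins (i + 1)) v.mem g.f w.mem g.f := by
    apply ObjEq.of_sameExcept hs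
    · intro x hx
      simp only [Res.wins, List.mem_cons, List.mem_nil_iff, or_false] at hx
      rcases hx with rfl | rfl | rfl
      all_goals simp only []
      all_goals omega
    · intro x hx y hy
      simp only [Res.wins, List.mem_cons, List.mem_nil_iff, or_false] at hx
      rcases hok y hy with q | q | q | q
      all_goals rcases hx with rfl | rfl | rfl
      all_goals simp only []
      all_goals omega
  have he' : ObjEq ResidueAtOK.wins v.mem g.f w.mem g.f := by
    apply he.sub
    intro x hx
    simp only [ResidueAtOK.wins, List.mem_cons, List.mem_nil_iff, or_false] at hx
    subst hx
    exact ⟨(160, 176), List.mem_cons_self, Nat.le_refl _, Nat.le_refl _⟩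
  -- the record, the class book's header, `residue_books`, `classdata`
  have hconfK := keptOld _ ((hres.R2.1.mono hres.ext6c).mono hAiAr)
  have hrecK : (Block.mk (resAt g v.mem i) Off.sizeof.Residue).Kept v.mem w.mem := by
    apply hconfK.mono
    · simp only [resAt, vacc, voff]
      omega
    · simp only [resAt, vacc, voff] at h1 hlt ⊢
      omega
  have hcbK : (codebooksBlock v.mem g.f).Kept v.mem w.mem :=
    keptOld _ (((((hloop.mid.own.cb0 (by omega)).ok (hloop.mid.own.nonnull (by omega))).F2.mono hres.ext6).mono
      hres.ext6c).mono hAiAr)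
  have h7 := hcur.R7
  have hcbkK : (Block.mk (Residue.cbk v.mem g.f (resAt g v.mem i)) 8).Kept v.mem w.mem := by
    apply hcbK.mono
    · simp only [vacc, voff]
      omega
    · simp only [vacc, voff] at h7 ⊢
      omega
  have hbooksK := keptOld _ ((hcur.R8 (by omega)).1.mono hAkAr)
  have hcdK := keptOld _ ((hcur.R8a (by omega)).1.mono hb.extr)
  have hrd := ResidueReads.of_kept he' hrecK hcbkK
  have er := Res.resAt_same he i
  have hjE : j < Residue.E v.mem g.f (resAt g v.mem i) := by
    rw [hb.e_eq]
    exact hb.j_lt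
  have hptr : ∀ q : Nat, q ≤ j →
      Residue.row w.mem (resAt g v.mem i) q = Residue.row v.mem (resAt g v.mem i) q := by
    intro q hq
    exact Residue.row_kept hrd hcdK (by omega)
  -- the bytes of row `j` above the one stored
  have hrest : (Block.mk (Residue.row v.mem (resAt g v.mem i) j + n)
      (Residue.W v.mem g.f (resAt g v.mem i) - n)).Kept v.mem w.mem := by
    apply Block.Kept.of_sameExcept hs
    · intro x hx
      simp only []
      rcases hok x hx with q | q | q | q
      · omega
      · omega
      · omega
      · omega
    · simp only []
      omega
  have en : n - 1 + 1 = n := by omega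
  exact
    { loop := hloop'
      extk := hb.extk
      extd := hb.extd
      extr := hb.extr
      extr' := hb.extr'
      rbp := hrbp.trans hb.rbp
      rbx := by
        rw [er]
        exact hrbx.trans hb.rbx
      r13 := hr13.trans hb.r13
      cnt := by
        have e38 : Mem.EqOn (g.R + 0x38) (g.R + 0x3c) v.mem w.mem := by
          apply hs.eqOn
          intro x hx
          rcases hok x hx with q | q | q | q
          · omega
          · omega
          · omega
          · omega
        unfold slot
        rw [e38.u32 (g.R + 0x38) (by omega) (by omega) (by omega)]
        exact hb.cnt
      cur := hcur.carry_obj he h64 hrecK hcbkK (fun _ => hbooksK) (fun _ hB => hB) (fun _ hB => hB)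
      e_eq := by
        rw [er, hrd.E]
        exact hb.e_eq
      j_lt := hb.j_lt
      rows := by
        rw [er]
        apply hb.rows.frame hrd (fun q hq => hptr q (by omega))
        intro q hq
        exact ⟨hb.rows.rows q hq, keptOld _ (hb.rows.rows q hq).1⟩
      row := by
        rw [er, hptr j (Nat.le_refl _), hrd.W]
        exact hrow
      r14 := hr14.trans hb.r14
      r12 := hr12
      n_le := by
        rw [er, hrd.W]
        omega
      temp := Nat.le_trans htemp hb.temp
      bytes := by
        rw [er]
        apply RowBytesFrom.step (k := n - 1) (mem := v.mem) ?_ hrd.W hrd.classifications (hptr j (Nat.le_refl _)) ?_ hbyte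
        · rw [en]
          exact hb.bytes
        · intro k' hk1 hk2
          exact hrest.u8 _ (by simp only []; omega) (by simp only []; omega) }

end R7

/-! ### The start of a row as a step lemma (R7b's success arm; it exercises `BodyR7Row` as an entry and builds `BodyR7K`) -/

namespace R7

/-- **THE ROW'S POINTER STORED, LOOP 4084 ENTERED**: from the return of a SUCCESSFUL `setup_malloc(f, W)` (`hne`: rax ≠ 0) to the head
of loop 4084 with all `W` bytes to store, over ONE footprint whose windows are the stack below the frame (the check sites' pushes),
the slot `[R + 18H, R + 20H)` (the spilled pointer, then `temp = j`) and the ONE qword `classdata[j]` (`hok`). `hval`: the row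
pointer reads back as the returned block; `htemp`: `temp ≤ j`. The snapshot `Ar` of the exit is the arena BEFORE the call (`A.1`): the
finished rows are blocks of it, the new row is not (`alloc`). The `classdata` block is told from every other block by its age
(`cur.R8a : Since Ak Ad`): `residue_config`, the codebooks, `residue_books` are blocks of `Ak`; the rows are no blocks of `Ad`. -/
theorem row_start {u₀ : State} {g : Ghost} {i j E : Nat} {A6 A6c Ai Ak Ad : Arena} {A A' : Arena × List Obj} {v w : State}
    {ws : List Span} (hb : BodyR7Row u₀ g i j E A6 A6c Ai Ak Ad A A' v) (hne : v.reg .rax ≠ 0)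
    (hs : Mem.SameExcept ws v.mem w.mem) (hun : ShadowUntouched v.mem w.mem)
    (hok : ∀ x, x ∈ ws → (g.R - 408 ≤ x.lo ∧ x.hi ≤ g.R + 8) ∨ (g.R + 0x18 ≤ x.lo ∧ x.hi ≤ g.R + 0x20) ∨
      (x.lo = Residue.classdata v.mem (resAt g v.mem i) + 8 * j ∧
        x.hi = Residue.classdata v.mem (resAt g v.mem i) + 8 * j + 8))
    (hval : Residue.row w.mem (resAt g v.mem i) j = (v.reg .rax).toNat)
    (htemp : slot g w.mem 0x18 ≤ j) (hbits : Bits (g.Blk A') g.len w.mem g.f)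
    (hrip : w.rip = L.start_decoder.loop32) (hrsp : w.reg .rsp = addr g.R) (hcode : CodeOK u₀ w.mem) (hinv : abiInv w)
    (hrbp : w.reg .rbp = v.reg .rbp) (hrbx : w.reg .rbx = v.reg .rbx) (hr13 : w.reg .r13 = v.reg .r13)
    (hr14 : w.reg .r14 = v.reg .r14) (hr12 : w.reg .r12 = R7.kword (Residue.W v.mem g.f (resAt g v.mem i))) :
    BodyR7K u₀ g i j E (Residue.W v.mem g.f (resAt g v.mem i)) A6 A6c Ai Ak Ad A.1 A' w := by
  have hloop := hb.loop
  have hres := hloop.res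
  have hcur := hb.cur
  have hlt := hcur.lt
  have h1 := hres.R1
  have h64 : i < 64 := by omega
  have harena := hloop.mid.arena
  have hp : Pos g A' := Pos.of_mid hloop.frame hloop.hand hloop.mid
  have p1 := hp.r_eq
  have p2 := hp.ra_lo
  have p3 := hp.ra_hi
  have p4 := hp.objOut
  have p5 := hp.ar_stack
  have p6 := hp.ar_hi
  have p7 := hp.f_stack
  have p8 := hp.f_hi
  obtain ⟨hrax, _, hnew⟩ := hb.alloc.of_ne_zero hne
  have hext := hb.alloc.ext
  have hAdA' : Ad.Extends A'.1 := hb.extd'.trans hext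
  have hjE : j < Residue.E v.mem g.f (resAt g v.mem i) := by
    rw [hb.e_eq]
    exact hb.j_lt
  -- the `classdata` table: allocated between `Ak` and `Ad`, inside the arena's buffer
  have hcd := hcur.R8a (by omega)
  have hcdA' := hcd.1.mono hAdA'
  have hcdAi := (hcd.older hb.extk).mono hAdA'
  have hcdIn := arena_inside harena hcdA'
  simp only [] at hcdIn
  -- every window is a window of the residue loop's carry
  have hwin : ∀ x, x ∈ ws → ResWin g i (resAt g v.mem i) Ai A' x ∨ (g.R + 0x18 ≤ x.lo ∧ x.hi ≤ g.R + 0x20) := by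
    intro x hx
    rcases hok x hx with q | q | q
    · exact Or.inl (Or.inl q)
    · exact Or.inr q
    · refine Or.inl (Or.inr (Or.inr (Or.inr (Or.inr (Or.inr (Or.inr (Or.inr (Or.inr (Or.inr (Or.inr (Or.inr ?_)))))))))))
      apply Young.of_since harena hres.exti hcdAi
      simp only []
      omega
  have hloop' := hloop.carry_spill hlt hs hun hwin hbits hrip hrsp hcode hinv
  -- a block of the arena other than the `classdata` table is kept
  have keptB : ∀ B : Block, A'.1.Blk B →
      B ≠ ⟨Residue.classdata v.mem (resAt g v.mem i), 8 * Residue.E v.mem g.f (resAt g v.mem i)⟩ → B.Kept v.mem w.mem := by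
    intro B hB hneB
    have hin := arena_inside harena hB
    have hd := arena_disjoint harena hB hcdA' hneB
    simp only [vblock] at hd
    apply Block.Kept.of_sameExcept hs
    · intro x hx
      rcases hok x hx with q | q | q
      · omega
      · omega
      · omega
    · omega
  -- a block of the snapshot `Ak` is such a block
  have keptOld : ∀ B : Block, Ak.Blk B → B.Kept v.mem w.mem := by
    intro B hB
    exact keptB B ((hB.mono hb.extd).mono hAdA') (Since.ne_old hB hcd)
  -- the windows of `*f` that the record reads
  have he : ObjEq (Res.wins (i + 1)) v.mem g.f w.mem g.f := by
    apply ObjEq.of_sameExcept hs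
    · intro x hx
      simp only [Res.wins, List.mem_cons, List.mem_nil_iff, or_false] at hx
      rcases hx with rfl | rfl | rfl
      all_goals simp only []
      all_goals omega
    · intro x hx y hy
      simp only [Res.wins, List.mem_cons, List.mem_nil_iff, or_false] at hx
      rcases hok y hy with q | q | q
      all_goals rcases hx with rfl | rfl | rfl
      all_goals simp only []
      all_goals omega
  have he' : ObjEq ResidueAtOK.wins v.mem g.f w.mem g.f := by
    apply he.sub
    intro x hx
    simp only [ResidueAtOK.wins, List.mem_cons, List.mem_nil_iff, or_false] at hx
    subst hx
    exact ⟨(160, 176), List.mem_cons_self, Nat.le_refl _, Nat.le_refl _⟩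
  -- the record, the class book's header, `residue_books`
  have hconfK := keptOld _ ((hres.R2.1.mono hres.ext6c).mono hb.extk)
  have hrecK : (Block.mk (resAt g v.mem i) Off.sizeof.Residue).Kept v.mem w.mem := by
    apply hconfK.mono
    · simp only [resAt, vacc, voff]
      omega
    · simp only [resAt, vacc, voff] at h1 hlt ⊢
      omega
  have hcbK : (codebooksBlock v.mem g.f).Kept v.mem w.mem :=
    keptOld _ (((((hloop.mid.own.cb0 (by omega)).ok (hloop.mid.own.nonnull (by omega))).F2.mono hres.ext6).mono
      hres.ext6c).mono hb.extk)
  have h7 := hcur.R7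
  have hcbkK : (Block.mk (Residue.cbk v.mem g.f (resAt g v.mem i)) 8).Kept v.mem w.mem := by
    apply hcbK.mono
    · simp only [vacc, voff]
      omega
    · simp only [vacc, voff] at h7 ⊢
      omega
  have hbooksK := keptOld _ (hcur.R8 (by omega)).1
  have hrd := ResidueReads.of_kept he' hrecK hcbkK
  have er := Res.resAt_same he i
  -- the row pointers below `j`: the part of the table before the qword stored
  have hlowK : (Block.mk (Residue.classdata v.mem (resAt g v.mem i)) (8 * j)).Kept v.mem w.mem := by
    apply Block.Kept.of_sameExcept hs
    · intro x hx
      simp only []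
      rcases hok x hx with q | q | q
      · omega
      · omega
      · omega
    · simp only []
      omega
  have hptr : ∀ q : Nat, q < j →
      Residue.row w.mem (resAt g v.mem i) q = Residue.row v.mem (resAt g v.mem i) q := by
    intro q hq
    unfold Residue.row
    rw [hrd.classdata]
    exact hlowK.ptr _ (by simp only []; omega) (by simp only []; omega)
  exact
    { loop := hloop'
      extk := hb.extk
      extd := hb.extd
      extr := hb.extd'
      extr' := hext
      rbp := hrbp.trans hb.rbp
      rbx := by
        rw [er]
        exact hrbx.trans hb.rbx
      r13 := hr13.trans hb.r13
      cnt := by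
        have e38 : Mem.EqOn (g.R + 0x38) (g.R + 0x3c) v.mem w.mem := by
          apply hs.eqOn
          intro x hx
          rcases hok x hx with q | q | q
          · omega
          · omega
          · omega
        unfold slot
        rw [e38.u32 (g.R + 0x38) (by omega) (by omega) (by omega)]
        exact hb.cnt
      cur := hcur.carry_obj he h64 hrecK hcbkK (fun _ => hbooksK) (fun _ hB => hB) (fun _ hB => hB)
      e_eq := by
        rw [er, hrd.E]
        exact hb.e_eq
      j_lt := hb.j_lt
      rows := by
        rw [er]
        apply hb.rows.frame hrd hptr
        intro q hq
        have hrowq := hb.rows.rows q hq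
        exact ⟨hrowq, keptB _ (hrowq.1.mono hext) (Since.ne_old hcd.1 hrowq).symm⟩
      row := by
        rw [er, hval, hrd.W, hrax]
        exact hnew
      r14 := hr14.trans hb.r14
      r12 := hr12
      n_le := by
        rw [er, hrd.W]
        exact Nat.le_refl _
      temp := htemp
      bytes := by
        rw [er]
        have h0 := RowBytesFrom.init w.mem g.f (resAt g v.mem i) j
        rw [hrd.W] at h0
        exact h0 }

end R7

/-! ### The composition -/

namespace R7

/-- **The parent's entry is the head of loop 4079 with `j = 0`**: `Ad` := the current arena, `E` := the class book's `entries`, no row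
yet (`RowsUpTo.zero`). Same address (pc_R7 = cut265 = loop31 = 0x115db9): no machine step. -/
theorem head_of_entry {u₀ : State} {g : Ghost} {i : Nat} {v : State} (h : AtR7 u₀ g i v) :
    AtR7J u₀ g i 0 (Residue.E v.mem g.f (resAt g v.mem i)) v := by
  obtain ⟨A6, A6c, Ai, Ak, A, hb⟩ := h
  exact ⟨A6, A6c, Ai, Ak, A.1, A,
    { loop := hb.loop
      extk := hb.extk
      extd := hb.extk'
      extd' := Arena.Extends.refl _
      rbp := hb.rbp
      rbx := hb.rbx
      r13 := hb.r13
      cnt := hb.cnt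
      cur := hb.cur
      e_eq := rfl
      j_le := Nat.zero_le _
      rows := RowsUpTo.zero _ _ _ _ }⟩

/-- The row counter of a head of loop 4079 is at most `E`. -/
theorem row_le {u₀ : State} {g : Ghost} {i j E : Nat} {v : State} (h : AtR7J u₀ g i j E v) : j ≤ E := by
  obtain ⟨A6, A6c, Ai, Ak, Ad, A, hb⟩ := h
  exact hb.j_le

/-- **Loop 4084 from its head**, from the child that makes one round (.R7c: head → the next row's head ∨ the head with one byte
less): the run ends at the head of loop 4079 for `j + 1`. Induction on the measure `n`. -/
theorem byte_loop {Lay : Layout} {μ : Microarch} {u₀ : State} (hc : SegR7c Lay μ u₀) (g : Ghost) (i j E : Nat) :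
    ∀ (n : Nat) (v : State), AtR7K u₀ g i j E n v → ReachVia Lay μ WayInv v (fun w => AtR7J u₀ g i (j + 1) E w) := by
  intro n
  induction n using Nat.strongRecOn with
  | _ n ih =>
    intro v hk
    refine (hc g i j E n v hk).trans ?_
    intro w1 h1
    rcases h1 with hrow | ⟨hpos, hnext⟩
    · exact ReachVia.done hrow
    · exact ih (n - 1) (by omega) w1 hnext

/-- **Loop 4079 from its head**: .R7a (the test; the parent's exit `AtR2 (i + 1)`, or the return of `setup_malloc`), .R7b (the row's
pointer stored and tested; the epilogue, or the head of loop 4084), loop 4084 (`byte_loop`) back to the head for `j + 1`. Induction on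
the measure `E − j`. -/
theorem row_loop {Lay : Layout} {μ : Microarch} {u₀ : State} (ha : SegR7a Lay μ u₀) (hb : SegR7b Lay μ u₀)
    (hc : SegR7c Lay μ u₀) (g : Ghost) (i E : Nat) :
    ∀ (m j : Nat) (v : State), E - j = m → AtR7J u₀ g i j E v →
      ReachVia Lay μ WayInv v (fun w => AtR2 u₀ g (i + 1) w ∨ AtERR u₀ g w) := by
  intro m
  induction m using Nat.strongRecOn with
  | _ m ih =>
    intro j v hm hj
    refine (ha g i j E v hj).trans ?_
    intro w1 h1
    rcases h1 with h2 | hrow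
    · exact ReachVia.done (Or.inl h2)
    · refine (hb g i j E w1 hrow).trans ?_
      intro w2 h2
      rcases h2 with ⟨n, hk⟩ | herr
      · refine (byte_loop hc g i j E n w2 hk).trans ?_
        intro w3 hnext
        have hle := row_le hnext
        exact ih (E - (j + 1)) (by omega) (j + 1) w3 rfl hnext
      · exact ReachVia.done (Or.inr herr)

end R7

/-- **THE COMPOSITION of the split of segment R7**: the entry is the head of loop 4079 with `j = 0` (`R7.head_of_entry`), then loop
4079 (`R7.row_loop`: a, b, then loop 4084 = c*). Pure logic: no machine step. -/
theorem SegR7.of_parts {Lay : Layout} {μ : Microarch} {u₀ : State}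
    (ha : SegR7a Lay μ u₀) (hb : SegR7b Lay μ u₀) (hc : SegR7c Lay μ u₀) : SegR7 Lay μ u₀ := by
  intro g i v hv
  have h0 := R7.head_of_entry hv
  exact R7.row_loop ha hb hc g i (Residue.E v.mem g.f (resAt g v.mem i))
    (Residue.E v.mem g.f (resAt g v.mem i) - 0) 0 v rfl h0

end Vorbis.Spec.StartDecoder
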